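-- pv_equiv track=rewrite | github.com/timeu/biopy-isatab | bcbio/isatab/parser.py | _parse_keyvals
-- ===== SOURCE A (Python) =====
-- def _parse_keyvals(line_iter):
--     """Generate dictionary from key/value pairs.
--     """
--     out = None
--     line = None
--     for line in line_iter:
--         if len(line) == 1 and line[0].upper() == line[0]:
--             break
--         else:
--             # setup output dictionaries, trimming off blank columns
--             if out is None:
--                 while not line[-1]:
--                     line = line[:-1]
--                 out = [{} for _ in line[1:]]
--             # add blank values if the line is stripped
--             while len(line) < len(out) + 1:
--                 line.append("")
--             for i in range(len(out)):
--                 out[i][line[0]] = line[i+1].strip()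
--             line = None
--     return out, line
-- ===== SOURCE B (Python) =====
-- def _parse_keyvals(line_iter):
--     """Generate dictionary from key/value pairs.
--
--     Two-phase rewrite: first collect the data rows (remembering the sentinel
--     row, if any), then build the dictionaries column by column with one dict
--     comprehension per value column. Return-value equivalent to A; unlike A it
--     does not pad the caller's row lists in place.
--     """
--     rows = []
--     sentinel = None
--     for line in line_iter:
--         if len(line) == 1 and line[0].upper() == line[0]:
--             sentinel = line
--             break
--         rows.append(line)
--     if not rows:
--         return None, sentinel
--     first = rows[0]
--     ncols = len(first)
--     while ncols > 0 and not first[ncols - 1]: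
--         ncols -= 1
--     out = [
--         {(row[0] if row else ""): (row[i + 1] if i + 1 < len(row) else "").strip()
--          for row in rows}
--         for i in range(ncols - 1)
--     ]
--     return out, sentinel
-- ===== Notes on version B (the rewrite author's own statement) =====
-- stated objective: alternative
-- what changed: A builds the dicts row-major in one stateful pass (creating/patching the out list while iterating); B first collects the data rows and the sentinel, then builds each value column's dict directly with a per-column dict comprehension over the collected rows.
-- outside the precondition, e.g. on _parse_keyvals([['', '']]): A raises IndexError, B returns ([], None)
-- crash fix: On inputs whose first data row (before any all-uppercase single-cell sentinel) consists only of empty strings, A raises IndexError in its trailing-blank trim loop; B returns ([], sentinel). — e.g. on _parse_keyvals([["", ""]]): A raises IndexError, B returns (some [], none)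
import Mathlib
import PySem

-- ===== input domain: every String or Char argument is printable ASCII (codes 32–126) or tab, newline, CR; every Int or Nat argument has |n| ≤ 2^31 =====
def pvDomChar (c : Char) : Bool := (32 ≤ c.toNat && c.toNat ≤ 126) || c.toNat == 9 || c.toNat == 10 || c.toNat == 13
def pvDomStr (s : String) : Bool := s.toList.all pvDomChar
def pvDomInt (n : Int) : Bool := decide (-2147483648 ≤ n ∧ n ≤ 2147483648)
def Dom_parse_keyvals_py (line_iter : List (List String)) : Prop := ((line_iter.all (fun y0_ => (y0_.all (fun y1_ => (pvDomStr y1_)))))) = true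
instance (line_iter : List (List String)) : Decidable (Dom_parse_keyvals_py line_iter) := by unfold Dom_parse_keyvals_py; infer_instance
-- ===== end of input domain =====

-- B restructures A's single stateful pass into collect-rows-then-build-columns (one dict per
-- value column built directly); return-value equivalence only: A pads the caller's row lists
-- in place ('line.append'), B does not mutate its argument.


-- ===== PORT A =====
-- `len(line) == 1 and line[0].upper() == line[0]` (line[0] guarded by the length test)
def pvIsBreak (line : List String) : Bool :=
  line.length == 1 && PySem.Str.upper (line.getD 0 "") == line.getD 0 ""

-- `while not line[-1]: line = line[:-1]` — on an all-blank line Python hits line[-1] on the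
-- empty list and raises IndexError (excluded by Pre_); the port returns [] there.
def pvTrim (line : List String) : List String :=
  match h : line.getLast? with
  | none => []
  | some c => if c = "" then pvTrim line.dropLast else line
termination_by line.length
decreasing_by
  have hne : line ≠ [] := by intro e; subst e; simp at h
  have hlen : line.length ≠ 0 := by simpa [List.length_eq_zero_iff] using hne
  simp [List.length_dropLast]
  omega

-- `while len(line) < len(out) + 1: line.append("")`
def pvPad (line : List String) (n : Nat) : List String :=
  if line.length < n then pvPad (line ++ [""]) n else line
termination_by n - line.length
decreasing_by simp; omega

-- `for i in range(len(out)): out[i][line[0]] = line[i+1].strip()` (indices in range after padding)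
def pvAssign (out : List (PySem.Dict String String)) (line : List String) : List (PySem.Dict String String) :=
  (List.range out.length).foldl
    (fun o i => o.set i (PySem.Dict.insert (o.getD i PySem.Dict.empty)
      (line.getD 0 "") (PySem.Str.strip (line.getD (i + 1) "")))) out

-- the `for line in line_iter` loop, state = (out, current line)
def pvALoop : Option (List (PySem.Dict String String)) → List (List String) →
    Option (List (PySem.Dict String String)) × Option (List String)
  | out, [] => (out, none)
  | out, line :: rest =>
    if pvIsBreak line then (out, some line)
    else
      match out with
      | none =>
        let t := pvTrim line
        let o := List.replicate (t.length - 1) (PySem.Dict.empty : PySem.Dict String String)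
        pvALoop (some (pvAssign o (pvPad t (o.length + 1)))) rest
      | some o => pvALoop (some (pvAssign o (pvPad line (o.length + 1)))) rest

def parse_keyvals_py (line_iter : List (List String)) :
    (Option (List (List (String × String)))) × Option (List String) :=
  match pvALoop none line_iter with
  | (out, line) => (out.map (fun ds => ds.map PySem.Dict.items), line)

-- ===== PORT B =====
-- the collect loop: data rows before the sentinel, plus the sentinel (None if exhausted)
def pvCollect : List (List String) → List (List String) × Option (List String)
  | [] => ([], none)
  | line :: rest =>
    if pvIsBreak line then ([], some line)
    else
      match pvCollect rest with
      | (rs, s) => (line :: rs, s)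

-- `while ncols > 0 and not first[ncols - 1]: ncols -= 1`
def pvNcols (first : List String) : Nat → Nat
  | 0 => 0
  | n + 1 => if first.getD n "" = "" then pvNcols first n else n + 1

-- the dict comprehension for value column i
def pvColDict (rows : List (List String)) (i : Nat) : PySem.Dict String String :=
  rows.foldl
    (fun d row => PySem.Dict.insert d (row.getD 0 "") (PySem.Str.strip (row.getD (i + 1) "")))
    PySem.Dict.empty

def parse_keyvals_py_alt (line_iter : List (List String)) :
    (Option (List (List (String × String)))) × Option (List String) :=
  match pvCollect line_iter with
  | ([], sentinel) => (none, sentinel)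
  | (first :: rs, sentinel) =>
    (some (((List.range (pvNcols first first.length - 1)).map (pvColDict (first :: rs))).map
      (fun d => d.items)), sentinel)

-- ===== PRECONDITION & SPEC =====
-- Pre_ excludes exactly the inputs where A raises IndexError: those whose first data row
-- (first row before any all-uppercase single-cell sentinel) consists only of empty strings.
def Pre_parse_keyvals_py (line_iter : List (List String)) : Prop :=
  ((line_iter.takeWhile (fun r => !pvIsBreak r)).head?.all (fun f => f.any (· != ""))) = true
instance (line_iter : List (List String)) : Decidable (Pre_parse_keyvals_py line_iter) := by
  unfold Pre_parse_keyvals_py; infer_instance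

def pvWitness_parse_keyvals_py : List (List String) := [["a", "1"], ["B"]]

-- On inputs whose first data row is entirely blank A raises IndexError; B returns ([], sentinel)
-- (checked by parse_keyvals_py_raises / parse_keyvals_py_raises_ok at the bottom of the file).
def Raises_parse_keyvals_py (line_iter : List (List String)) : Prop :=
  ((line_iter.takeWhile (fun r => !pvIsBreak r)).head?.elim false (fun f => f.all (· == ""))) = true
instance (line_iter : List (List String)) : Decidable (Raises_parse_keyvals_py line_iter) := by
  unfold Raises_parse_keyvals_py; infer_instance

def pvRaiseWitness_parse_keyvals_py : List (List String) := [["", ""]]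
def pvRaiseWitnessOut_parse_keyvals_py :
    (Option (List (List (String × String)))) × Option (List String) := (some [], none)

def Spec_parse_keyvals_py (line_iter : List (List String))
    (out : (Option (List (List (String × String)))) × Option (List String)) : Prop :=
  out = parse_keyvals_py_alt line_iter
instance (line_iter : List (List String))
    (out : (Option (List (List (String × String)))) × Option (List String)) :
    Decidable (Spec_parse_keyvals_py line_iter out) := by unfold Spec_parse_keyvals_py; infer_instance

-- ===== CLAIM (what is proved, stated in full; the proofs are below) =====
def Claim_equal_parse_keyvals_py : Prop := ∀ (line_iter : List (List String)), Dom_parse_keyvals_py line_iter → Pre_parse_keyvals_py line_iter → Spec_parse_keyvals_py line_iter (parse_keyvals_py line_iter)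

def Claim_raises_parse_keyvals_py : Prop := (∀ (line_iter : List (List String)), Dom_parse_keyvals_py line_iter → Raises_parse_keyvals_py line_iter → ¬ Pre_parse_keyvals_py line_iter) ∧ (Dom_parse_keyvals_py (pvRaiseWitness_parse_keyvals_py) ∧ Raises_parse_keyvals_py (pvRaiseWitness_parse_keyvals_py) ∧ parse_keyvals_py_alt (pvRaiseWitness_parse_keyvals_py) = pvRaiseWitnessOut_parse_keyvals_py)

-- ===== LEMMAS AND PROOFS =====

-- one row's contribution to value column i
def pvStep (i : Nat) (d : PySem.Dict String String) (row : List String) : PySem.Dict String String :=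
  d.insert (row.getD 0 "") (PySem.Str.strip (row.getD (i + 1) ""))

theorem pvColDict_eq (rows : List (List String)) (i : Nat) :
    pvColDict rows i = rows.foldl (pvStep i) PySem.Dict.empty := rfl

theorem pvGetD_append_blank (xs : List String) (j : Nat) :
    (xs ++ [""]).getD j "" = xs.getD j "" := by
  rcases Nat.lt_or_ge j xs.length with hj | hj
  · simp [List.getD, List.getElem?_append_left hj]
  · have h1 : xs[j]? = none := List.getElem?_eq_none hj
    have h2 : (xs ++ [""])[j]? = ([""] : List String)[j - xs.length]? := List.getElem?_append_right hj
    simp only [List.getD, h1, h2, Option.getD_none]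
    rcases Nat.eq_zero_or_pos (j - xs.length) with h | h <;> simp [h]

theorem pvPad_getD (xs : List String) (n : Nat) (j : Nat) :
    (pvPad xs n).getD j "" = xs.getD j "" := by
  fun_induction pvPad with
  | case1 xs h ih => rw [ih, pvGetD_append_blank]
  | case2 => rfl

theorem pvSet_map_range {D : Type} (N : Nat) (g : Nat → D) (k : Nat) (v : D) :
    ((List.range N).map g).set k v = (List.range N).map (fun i => if i = k then v else g i) := by
  apply List.ext_getElem
  · simp
  · intro i h1 h2
    rw [List.getElem_set]
    simp only [List.getElem_map, List.getElem_range]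
    split_ifs with ha hb hb
    · rfl
    · omega
    · omega
    · rfl

theorem pvGetD_map_range {D : Type} (N : Nat) (g : Nat → D) (k : Nat) (hk : k < N) (d : D) :
    ((List.range N).map g).getD k d = g k := by
  rw [List.getD, List.getElem?_eq_getElem (by simpa using hk)]
  simp

theorem pvFoldlSet (line : List String) :
    ∀ (m k : Nat) (g : Nat → PySem.Dict String String) (N : Nat), k + m = N →
    (List.range' k m).foldl
      (fun o i => o.set i (PySem.Dict.insert (o.getD i PySem.Dict.empty)
        (line.getD 0 "") (PySem.Str.strip (line.getD (i + 1) "")))) ((List.range N).map g)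
      = (List.range N).map (fun i => if k ≤ i then pvStep i (g i) line else g i) := by
  intro m
  induction m with
  | zero =>
    intro k g N hN
    simp only [List.range', List.foldl_nil]
    symm
    apply List.map_congr_left
    intro i hi
    simp only [List.mem_range] at hi
    have : ¬ (k ≤ i) := by omega
    simp [this]
  | succ m ih =>
    intro k g N hN
    rw [show List.range' k (m + 1) = k :: List.range' (k + 1) m from rfl]
    simp only [List.foldl_cons]
    rw [pvGetD_map_range N g k (by omega), pvSet_map_range N g k]
    rw [ih (k + 1) _ N (by omega)]
    apply List.map_congr_left
    intro i hi
    simp only [List.mem_range] at hi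
    by_cases hik : i = k
    · subst hik
      simp [pvStep]
    · have h1 : (k + 1 ≤ i) ↔ (k ≤ i) := by omega
      simp [hik, h1]

theorem pvAssign_map (n : Nat) (g : Nat → PySem.Dict String String) (line : List String) :
    pvAssign ((List.range n).map g) line = (List.range n).map (fun i => pvStep i (g i) line) := by
  unfold pvAssign
  simp only [List.length_map, List.length_range]
  have h := pvFoldlSet line n 0 g n (by omega)
  rw [List.range_eq_range'] at h ⊢
  rw [h]
  simp

theorem pvL1 (rows : List (List String)) :
    ∀ (n : Nat) (g : Nat → PySem.Dict String String),
    pvALoop (some ((List.range n).map g)) rows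
      = (some ((List.range n).map (fun i => (pvCollect rows).1.foldl (pvStep i) (g i))),
         (pvCollect rows).2) := by
  induction rows with
  | nil => simp [pvALoop, pvCollect]
  | cons r rest ih =>
    intro n g
    by_cases hb : pvIsBreak r
    · simp [pvALoop, pvCollect, hb]
    · rcases hpc : pvCollect rest with ⟨rs, s⟩
      have hassign : pvAssign ((List.range n).map g) (pvPad r (((List.range n).map g).length + 1))
          = (List.range n).map (fun i => pvStep i (g i) r) := by
        rw [pvAssign_map]
        apply List.map_congr_left
        intro i _
        simp only [pvStep, pvPad_getD]
      simp only [pvALoop, pvCollect, hb, Bool.false_eq_true, if_false, hassign,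
        ih n (fun i => pvStep i (g i) r), hpc, List.foldl_cons]

theorem pvNcols_le (f : List String) : ∀ n, pvNcols f n ≤ n := by
  intro n
  induction n with
  | zero => simp [pvNcols]
  | succ n ih =>
    simp only [pvNcols]
    split
    · omega
    · omega

theorem pvNcols_congr (a b : List String) :
    ∀ n, (∀ j, j < n → a.getD j "" = b.getD j "") → pvNcols a n = pvNcols b n := by
  intro n
  induction n with
  | zero => intro _; rfl
  | succ n ih =>
    intro h
    simp only [pvNcols]
    rw [h n (by omega)]
    split
    · exact ih (fun j hj => h j (by omega))
    · rfl

theorem pvNcols_zero_all_blank (f : List String) :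
    ∀ n, pvNcols f n = 0 → ∀ j, j < n → f.getD j "" = "" := by
  intro n
  induction n with
  | zero => intro _ j hj; omega
  | succ n ih =>
    intro h0 j hj
    simp only [pvNcols] at h0
    by_cases hc : f.getD n "" = ""
    · rw [if_pos hc] at h0
      rcases Nat.lt_or_ge j n with hj' | hj'
      · exact ih h0 j hj'
      · have hje : j = n := by omega
        subst hje; exact hc
    · rw [if_neg hc] at h0; omega

theorem pvNcols_pos (f : List String) (h : ∃ c ∈ f, c ≠ "") : 1 ≤ pvNcols f f.length := by
  by_contra hlt
  have h0 : pvNcols f f.length = 0 := by omega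
  obtain ⟨c, hc, hne⟩ := h
  obtain ⟨j, hj, hje⟩ := List.mem_iff_getElem.1 hc
  have hblank := pvNcols_zero_all_blank f f.length h0 j hj
  rw [List.getD, List.getElem?_eq_getElem hj] at hblank
  simp only [Option.getD_some] at hblank
  exact hne (hje ▸ hblank)

theorem pvTake_getD (xs : List String) (k : Nat) (j : Nat) (hj : j < k) :
    (xs.take k).getD j "" = xs.getD j "" := by
  rw [List.getD, List.getD, List.getElem?_take]
  rw [if_pos hj]

theorem pvTrim_eq_take (xs0 : List String) : pvTrim xs0 = xs0.take (pvNcols xs0 xs0.length) := by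
  fun_induction pvTrim with
  | case1 xs h =>
    have hnil : xs = [] := List.getLast?_eq_none_iff.1 h
    subst hnil
    rfl
  | case2 xs h ih =>
    have hne : xs ≠ [] := by intro e; subst e; simp at h
    have hlen0 : xs.length ≠ 0 := by simpa [List.length_eq_zero_iff] using hne
    have hm : xs.length = xs.dropLast.length + 1 := by simp [List.length_dropLast]; omega
    have hgl : xs.getD xs.dropLast.length "" = "" := by
      rw [List.getD, show xs.dropLast.length = xs.length - 1 by simp [List.length_dropLast],
        ← List.getLast?_eq_getElem?, h]
      rfl
    have hcongr : pvNcols xs xs.dropLast.length = pvNcols xs.dropLast xs.dropLast.length := by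
      apply pvNcols_congr
      intro j hj
      have hj' : j < xs.length - 1 := by simpa using hj
      rw [List.getD, List.getD, List.getElem?_dropLast, if_pos hj']
    have hstep : pvNcols xs xs.length = pvNcols xs xs.dropLast.length := by
      rw [hm]
      simp only [pvNcols]
      rw [hgl, if_pos rfl]
    have hk : pvNcols xs.dropLast xs.dropLast.length ≤ xs.dropLast.length := pvNcols_le _ _
    set K := pvNcols xs.dropLast xs.dropLast.length with hK
    have htk : xs.dropLast.take K = xs.take K := by
      rw [List.dropLast_eq_take, List.take_take]
      congr 1
      simp only [List.length_dropLast] at hk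
      omega
    rw [ih, hstep, hcongr]
    exact htk
  | case3 xs c h hc =>
    have hne : xs ≠ [] := by intro e; subst e; simp at h
    have hlen0 : xs.length ≠ 0 := by simpa [List.length_eq_zero_iff] using hne
    have hm : xs.length = xs.dropLast.length + 1 := by simp [List.length_dropLast]; omega
    have hgl : xs.getD xs.dropLast.length "" = c := by
      rw [List.getD, show xs.dropLast.length = xs.length - 1 by simp [List.length_dropLast],
        ← List.getLast?_eq_getElem?, h]
      rfl
    have hstep : pvNcols xs xs.length = xs.length := by
      rw [hm]
      simp only [pvNcols]
      rw [hgl, if_neg hc, ← hm]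
    rw [hstep, List.take_length]

-- ===== VERDICT (by name: the statement is the Claim_ definition above) =====
theorem pvReplicate_eq_map_range (k : Nat) :
    List.replicate k (PySem.Dict.empty : PySem.Dict String String)
      = (List.range k).map (fun _ => PySem.Dict.empty) := by
  simp

theorem parse_keyvals_py_spec : Claim_equal_parse_keyvals_py := by
  unfold Claim_equal_parse_keyvals_py
  intro l _ hpre
  unfold Spec_parse_keyvals_py
  cases l with
  | nil => rfl
  | cons r rest =>
    by_cases hb : pvIsBreak r
    · simp [parse_keyvals_py, parse_keyvals_py_alt, pvALoop, pvCollect, hb]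
    · have hex : ∃ c ∈ r, c ≠ "" := by
        unfold Pre_parse_keyvals_py at hpre
        rw [List.takeWhile_cons] at hpre
        simp only [hb, Bool.not_false, if_true, List.head?_cons, Option.all_some] at hpre
        simpa [List.any_eq_true, bne_iff_ne] using hpre
      have hm1 : 1 ≤ pvNcols r r.length := pvNcols_pos r hex
      have hmle : pvNcols r r.length ≤ r.length := pvNcols_le r _
      have ht : pvTrim r = r.take (pvNcols r r.length) := pvTrim_eq_take r
      have htlen : (pvTrim r).length = pvNcols r r.length := by
        rw [ht]; simp only [List.length_take]; omega
      have hpadt : pvPad (pvTrim r) (((pvTrim r).length - 1) + 1) = pvTrim r := by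
        rw [pvPad, if_neg (by omega)]
      rcases hpc : pvCollect rest with ⟨rs, s⟩
      have hassign : pvAssign (List.replicate ((pvTrim r).length - 1) PySem.Dict.empty)
            (pvPad (pvTrim r) ((List.replicate ((pvTrim r).length - 1)
              (PySem.Dict.empty : PySem.Dict String String)).length + 1))
          = (List.range ((pvTrim r).length - 1)).map
              (fun i => pvStep i PySem.Dict.empty r) := by
        rw [List.length_replicate, hpadt, pvReplicate_eq_map_range, pvAssign_map]
        apply List.map_congr_left
        intro i hi
        simp only [List.mem_range] at hi
        have h0 : (pvTrim r).getD 0 "" = r.getD 0 "" := by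
          rw [ht]; exact pvTake_getD r _ 0 (by omega)
        have h1 : (pvTrim r).getD (i + 1) "" = r.getD (i + 1) "" := by
          rw [ht]; exact pvTake_getD r _ (i + 1) (by omega)
        simp only [pvStep, h0, h1]
      have hA : parse_keyvals_py (r :: rest)
          = (some (((List.range ((pvTrim r).length - 1)).map
              (fun i => rs.foldl (pvStep i) (pvStep i PySem.Dict.empty r))).map
                (fun ds => ds.items)), s) := by
        unfold parse_keyvals_py
        simp only [pvALoop, hb, Bool.false_eq_true, if_false, hassign,
          pvL1 rest ((pvTrim r).length - 1) (fun i => pvStep i PySem.Dict.empty r), hpc]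
        rfl
      have hB : parse_keyvals_py_alt (r :: rest)
          = (some (((List.range (pvNcols r r.length - 1)).map
              (fun i => rs.foldl (pvStep i) (pvStep i PySem.Dict.empty r))).map
                (fun d => d.items)), s) := by
        unfold parse_keyvals_py_alt
        rw [show pvCollect (r :: rest) = (r :: rs, s) by simp [pvCollect, hb, hpc]]
        have hcd : ∀ i, pvColDict (r :: rs) i = rs.foldl (pvStep i) (pvStep i PySem.Dict.empty r) := by
          intro i; rw [pvColDict_eq, List.foldl_cons]
        show (some (((List.range (pvNcols r r.length - 1)).map (pvColDict (r :: rs))).map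
          (fun d => d.items)), s) = _
        rw [List.map_congr_left (fun i _ => hcd i)]
      rw [hA, hB, htlen]

theorem parse_keyvals_py_raises : Claim_raises_parse_keyvals_py := by
  unfold Claim_raises_parse_keyvals_py
  constructor
  · intro l _ hr
    unfold Raises_parse_keyvals_py at hr
    unfold Pre_parse_keyvals_py
    cases hh : (l.takeWhile fun x => !pvIsBreak x).head? with
    | none => rw [hh] at hr; simp at hr
    | some f =>
      rw [hh] at hr
      simp only [Option.elim] at hr
      simp only [List.all_eq_true, beq_iff_eq] at hr
      simp only [Option.all_some, List.any_eq_true, bne_iff_ne]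
      rintro ⟨c, hc, hne⟩
      exact hne (hr c hc)
  · exact ⟨by decide, by decide, by decide⟩

-- self-check: the raise witness satisfies Raises_ and is indeed excluded by Pre_
theorem parse_keyvals_py_raises_ok :
    Raises_parse_keyvals_py pvRaiseWitness_parse_keyvals_py ∧
      ¬ Pre_parse_keyvals_py pvRaiseWitness_parse_keyvals_py :=
  ⟨parse_keyvals_py_raises.2.2.1,
   parse_keyvals_py_raises.1 _ parse_keyvals_py_raises.2.1 parse_keyvals_py_raises.2.2.1⟩
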